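-- pv_equiv track=rewrite | github.com/oakoneric/mathTUD | Math-Ma-MSTAT/maketexable.py | findNextCommandNotAsOpt
-- ===== SOURCE A (Python) =====
-- ALPHABET = "abcdefghijklmnopqrstuvwxyzABCDEFGHIJKLMNOPQRSTUVWXYZ*"
--
-- def findNextCommand(text, command, pos):
--     """Find next occurence of the command command after pos in text.
--
--     command must include the backslash
--     Return the starting index of the command.
--     Return -1 if not found.
--     """
--     while True:
--         pos = text.find(command, pos)
--         if pos == -1:
--             return -1
--         if pos + len(command) >= len(text):
--             # command at end of text
--             return pos
--         if text[pos + len(command)] not in ALPHABET: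
--             return pos
--         else:
--             pos = pos + 1
--
-- def findNextCommandNotAsOpt(text, badCommand, pos):
--     """Find next instance of badCommand after pos in text that is not in [ ].
--
--     \\Big and \\big and \\bigg and \\Bigg
--     are not interesting if they are optional arguments
--     to \\set, \\klammern, etc. So ignore cases of those.
--     """
--     while pos != -1:
--         pos = findNextCommand(text, badCommand, pos)
--         if pos == -1:  # not found
--             return -1
--         if (pos == 0 or text[pos - 1] != "["
--             or pos + len(badCommand) >= len(text)
--             or text[pos + len(badCommand)] != "]"):
--             return pos
--         # else:
--         pos = pos + 1  # do not find the same one again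
-- ===== SOURCE B (Python) =====
-- ALPHABET = "abcdefghijklmnopqrstuvwxyzABCDEFGHIJKLMNOPQRSTUVWXYZ*"
--
-- def findNextCommandNotAsOpt(text, badCommand, pos):
--     """Single left-to-right scan: return the first index i >= pos where
--     badCommand occurs, is not followed by an ALPHABET character, and is
--     not enclosed as an optional argument [badCommand]; -1 if none."""
--     n, m = len(text), len(badCommand)
--     start = pos if pos >= 0 else max(0, n + pos)
--     for i in range(start, n - m + 1):
--         if text[i:i+m] == badCommand \
--            and (i + m >= n or text[i+m] not in ALPHABET) \
--            and not (i > 0 and text[i-1] == "[" and i + m < n and text[i+m] == "]"):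
--             return i
--     return -1
-- ===== Notes on version B (the rewrite author's own statement) =====
-- stated objective: simpler
-- what changed: Replaces the two nested find-and-restart while loops (str.find plus skip-forward in findNextCommand, plus the outer bracket-skip loop) by one inlined linear scan that tests each candidate index once against all three conditions (occurrence, not followed by an ALPHABET character, not bracketed as [cmd]). Pre_ excludes only pos == -1, where A's while guard is false from the start and A returns None instead of an int.
-- outside the precondition, e.g. on findNextCommandNotAsOpt('\\big', '\\big', -1): A returns None, B returns -1
import Mathlib
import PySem

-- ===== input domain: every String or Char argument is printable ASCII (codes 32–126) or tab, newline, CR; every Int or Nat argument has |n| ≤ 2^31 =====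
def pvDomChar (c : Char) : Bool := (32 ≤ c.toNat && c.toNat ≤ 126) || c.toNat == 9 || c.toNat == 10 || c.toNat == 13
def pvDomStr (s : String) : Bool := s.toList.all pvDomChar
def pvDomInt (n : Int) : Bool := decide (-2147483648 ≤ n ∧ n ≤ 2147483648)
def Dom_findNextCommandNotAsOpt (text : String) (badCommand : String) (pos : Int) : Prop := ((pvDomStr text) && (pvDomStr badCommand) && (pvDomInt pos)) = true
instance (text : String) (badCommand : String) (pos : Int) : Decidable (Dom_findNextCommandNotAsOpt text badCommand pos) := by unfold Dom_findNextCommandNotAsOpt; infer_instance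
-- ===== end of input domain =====

-- B replaces A's two nested find-and-restart while loops by one linear scan that
-- tests every candidate index once against all three conditions (objective: simpler).

-- ===== PORT A =====
def pvAlphabet : List Char := "abcdefghijklmnopqrstuvwxyzABCDEFGHIJKLMNOPQRSTUVWXYZ*".toList

-- findNextCommand: 'while True' ported with fuel; pos strictly increases and is
-- bounded by len(text), so fuel len(text)+2 is never exhausted.
def pvFindNextCommand (t cmd : List Char) : Nat → Int → Int
  | 0, _ => -1  -- unreachable with the fuel the caller supplies
  | fuel + 1, pos =>
    let p := PySem.Chars.findFrom t cmd pos none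
    if p = -1 then -1
    else if (t.length : Int) ≤ p + cmd.length then p
    else if (pvAlphabet.contains (PySem.List.pyGetD t (p + cmd.length) ' ')) = false then p
    else pvFindNextCommand t cmd fuel (p + 1)

-- outer 'while pos != -1' loop, same fuel argument; when pos = -1 the Python falls
-- out of the loop and returns None (not an int) — excluded by Pre_, the port gives -1.
def pvOuterLoop (t cmd : List Char) : Nat → Int → Int
  | 0, _ => -1  -- unreachable with the fuel the caller supplies
  | fuel + 1, pos =>
    if pos = -1 then -1
    else
      let p := pvFindNextCommand t cmd (t.length + 2) pos
      if p = -1 then -1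
      else if p = 0 ∨ PySem.List.pyGetD t (p - 1) ' ' ≠ '['
              ∨ (t.length : Int) ≤ p + cmd.length
              ∨ PySem.List.pyGetD t (p + cmd.length) ' ' ≠ ']' then p
      else pvOuterLoop t cmd fuel (p + 1)

def findNextCommandNotAsOpt (text : String) (badCommand : String) (pos : Int) : Int :=
  pvOuterLoop text.toList badCommand.toList (text.toList.length + 2) pos

-- ===== PORT B =====
-- the loop-body condition of Source B's single scan
def pvGoodB (t b : List Char) (i : Int) : Bool :=
  (PySem.List.slice t (some i) (some (i + b.length)) == b)
  && (decide ((t.length : Int) ≤ i + b.length)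
      || !(pvAlphabet.contains (PySem.List.pyGetD t (i + b.length) ' ')))
  && !(decide (0 < i) && (PySem.List.pyGetD t (i - 1) ' ' == '[')
       && decide (i + (b.length : Int) < t.length)
       && (PySem.List.pyGetD t (i + b.length) ' ' == ']'))

-- 'for i in range(start, n - m + 1): if cond: return i' / 'return -1'
def pvScan (t b : List Char) (start : Int) : Int :=
  match (PySem.List.pyRange start ((t.length : Int) - b.length + 1) 1).find? (pvGoodB t b) with
  | some i => i
  | none => -1

def findNextCommandNotAsOpt_alt (text : String) (badCommand : String) (pos : Int) : Int :=
  let t := text.toList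
  let b := badCommand.toList
  let start := if 0 ≤ pos then pos else max 0 ((t.length : Int) + pos)
  pvScan t b start

-- ===== PRECONDITION & SPEC =====
-- Pre_ excludes only pos = -1: there A's 'while pos != -1' guard is false from the
-- start and A returns None instead of an int.
def Pre_findNextCommandNotAsOpt (text : String) (badCommand : String) (pos : Int) : Prop :=
  pos ≠ -1
instance (text : String) (badCommand : String) (pos : Int) : Decidable (Pre_findNextCommandNotAsOpt text badCommand pos) := by unfold Pre_findNextCommandNotAsOpt; infer_instance

def pvWitness_findNextCommandNotAsOpt : String × String × Int := ("[\\big] \\big x", "\\big", 0)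

def Spec_findNextCommandNotAsOpt (text : String) (badCommand : String) (pos : Int) (out : Int) : Prop := out = findNextCommandNotAsOpt_alt text badCommand pos
instance (text : String) (badCommand : String) (pos : Int) (out : Int) : Decidable (Spec_findNextCommandNotAsOpt text badCommand pos out) := by unfold Spec_findNextCommandNotAsOpt; infer_instance

-- ===== CLAIM (what is proved, stated in full; the proofs are below) =====
def Claim_equal_findNextCommandNotAsOpt : Prop := ∀ (text : String) (badCommand : String) (pos : Int), Dom_findNextCommandNotAsOpt text badCommand pos → Pre_findNextCommandNotAsOpt text badCommand pos → Spec_findNextCommandNotAsOpt text badCommand pos (findNextCommandNotAsOpt text badCommand pos)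

-- ===== LEMMAS AND PROOFS =====

-- ===== LEMMAS AND PROOFS =====

-- proof-side decomposition of B's scan condition
def pvOcc (t b : List Char) (i : Int) : Bool :=
  PySem.List.slice t (some i) (some (i + b.length)) == b

def pvFollow (t b : List Char) (i : Int) : Bool :=
  decide ((t.length : Int) ≤ i + b.length)
    || !(pvAlphabet.contains (PySem.List.pyGetD t (i + b.length) ' '))

def pvQ (t b : List Char) (i : Int) : Bool := pvOcc t b i && pvFollow t b i

def pvBr (t b : List Char) (i : Int) : Bool :=
  decide (0 < i) && (PySem.List.pyGetD t (i - 1) ' ' == '[')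
    && decide (i + (b.length : Int) < t.length)
    && (PySem.List.pyGetD t (i + b.length) ' ' == ']')

theorem pvGoodB_eq (t b : List Char) (i : Int) :
    pvGoodB t b i = (pvQ t b i && !pvBr t b i) := by
  simp [pvGoodB, pvQ, pvOcc, pvFollow, pvBr, Bool.and_assoc]

-- "r is the first index in [k, hi) satisfying Q, or -1 if none"
def pvFirst (Q : Int → Bool) (k hi r : Int) : Prop :=
  (r = -1 ∧ ∀ i, k ≤ i → i < hi → Q i = false) ∨
  (k ≤ r ∧ r < hi ∧ Q r = true ∧ ∀ i, k ≤ i → i < r → Q i = false)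

theorem pvFirst_mono (Q : Int → Bool) (k p hi r : Int) (hkp : k ≤ p)
    (h : ∀ i, k ≤ i → i < p → Q i = false) :
    pvFirst Q p hi r → pvFirst Q k hi r := by
  rintro (⟨h1, h2⟩ | ⟨h1, h2, h3, h4⟩)
  · exact Or.inl ⟨h1, fun i hi1 hi2 =>
      if hip : i < p then h i hi1 hip else h2 i (by omega) hi2⟩
  · exact Or.inr ⟨by omega, h2, h3, fun i hi1 hi2 =>
      if hip : i < p then h i hi1 hip else h4 i (by omega) hi2⟩

-- findFrom with end? = none, unfolded
theorem pvFindFrom_none_eq (t b : List Char) (k : Int) :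
    PySem.Chars.findFrom t b k none =
      (if (t.length : Int) < (if k < 0 then (if k + t.length < 0 then 0 else k + t.length) else k) then -1
       else
         let st := (if k < 0 then (if k + t.length < 0 then 0 else k + t.length) else k)
         if PySem.Chars.find (t.drop st.toNat) b = -1 then -1
         else st + PySem.Chars.find (t.drop st.toNat) b) := by
  simp only [PySem.Chars.findFrom, Int.toNat_natCast, List.take_length]

theorem pvFindFrom_clamp (t b : List Char) (k : Int) (hk : k < 0) :
    PySem.Chars.findFrom t b k none =
      PySem.Chars.findFrom t b (if k + t.length < 0 then 0 else k + t.length) none := by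
  rw [pvFindFrom_none_eq, pvFindFrom_none_eq]
  have h1 : ¬ ((if k + (t.length:Int) < 0 then 0 else k + t.length) < 0) := by split <;> omega
  simp [hk, h1]

-- B's scan: one step over a failing index
theorem pvScan_step (t b : List Char) (k : Int) (hk : pvGoodB t b k = false) :
    pvScan t b k = pvScan t b (k + 1) := by
  unfold pvScan
  by_cases h : k < (t.length : Int) - b.length + 1
  · rw [PySem.List.pyRange_one_cons h]
    simp [List.find?, hk]
  · rw [PySem.List.pyRange_one_eq_nil (by omega), PySem.List.pyRange_one_eq_nil (by omega)]

theorem pvScan_found (t b : List Char) (k : Int) (hk : pvGoodB t b k = true)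
    (h : k < (t.length : Int) - b.length + 1) : pvScan t b k = k := by
  unfold pvScan
  rw [PySem.List.pyRange_one_cons h]
  simp [List.find?, hk]

theorem pvScan_skip_aux (t b : List Char) :
    ∀ (d : Nat) (k : Int), (∀ i, k ≤ i → i < k + d → pvGoodB t b i = false) →
      pvScan t b k = pvScan t b (k + d)
  | 0, k, _ => by simp
  | d + 1, k, h => by
    rw [pvScan_step t b k (h k le_rfl (by omega))]
    have ih := pvScan_skip_aux t b d (k + 1) (fun i h1 h2 => h i (by omega) (by push_cast; omega))
    rw [ih]
    congr 1
    push_cast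
    ring

theorem pvScan_skip (t b : List Char) (k p : Int) (hkp : k ≤ p)
    (h : ∀ i, k ≤ i → i < p → pvGoodB t b i = false) :
    pvScan t b k = pvScan t b p := by
  have hd : p = k + ((p - k).toNat : Int) := by omega
  rw [hd]
  exact pvScan_skip_aux t b (p - k).toNat k (fun i h1 h2 => h i h1 (by omega))

theorem pvScan_none (t b : List Char) (k : Int)
    (h : ∀ i, k ≤ i → i < (t.length : Int) - b.length + 1 → pvGoodB t b i = false) :
    pvScan t b k = -1 := by
  by_cases hk : k < (t.length : Int) - b.length + 1
  · rw [pvScan_skip t b k ((t.length : Int) - b.length + 1) (le_of_lt hk) h]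
    unfold pvScan
    rw [PySem.List.pyRange_one_eq_nil le_rfl]
    rfl
  · unfold pvScan
    rw [PySem.List.pyRange_one_eq_nil (by omega)]
    rfl

-- occurrence test of B = prefix-at-index
theorem pvOcc_iff (t b : List Char) (i : Int) (hi : 0 ≤ i) :
    pvOcc t b i = true ↔ b <+: t.drop i.toNat := by
  unfold pvOcc
  rw [PySem.List.slice_toNat t hi (by omega)]
  have h : (i + (b.length : Int)).toNat - i.toNat = b.length := by omega
  rw [h, beq_iff_eq]
  constructor
  · intro h2
    exact h2 ▸ List.take_prefix _ _
  · intro h2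
    exact (List.prefix_iff_eq_take.mp h2).symm

theorem pvQ_false_of_no_prefix (t b : List Char) (i : Int) (hi : 0 ≤ i)
    (h : ¬ b <+: t.drop i.toNat) : pvQ t b i = false := by
  have : pvOcc t b i = false := by
    cases hocc : pvOcc t b i
    · rfl
    · exact absurd ((pvOcc_iff t b i hi).mp hocc) h
  simp [pvQ, this]
theorem pvInner_spec (t b : List Char) (fuel : Nat) : ∀ (k : Int), 0 ≤ k →
    (t.length : Int) + 1 ≤ (fuel : Int) + k →
    pvFirst (pvQ t b) k ((t.length : Int) - b.length + 1) (pvFindNextCommand t b fuel k) := by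
  induction fuel with
  | zero =>
    intro k hk hf
    exact Or.inl ⟨rfl, fun i h1 h2 => absurd h2 (by push_cast at hf ⊢; omega)⟩
  | succ f ih =>
    intro k hk hf
    by_cases hkn : (t.length : Int) < k
    · have hff : PySem.Chars.findFrom t b k none = -1 := by
        rw [pvFindFrom_none_eq]
        simp [show ¬ k < 0 by omega, hkn]
      have hres : pvFindNextCommand t b (f + 1) k = -1 := by
        simp [pvFindNextCommand, hff]
      rw [hres]
      exact Or.inl ⟨rfl, fun i h1 h2 => absurd h2 (by omega)⟩
    · have hff : PySem.Chars.findFrom t b k none =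
          (if PySem.Chars.find (t.drop k.toNat) b = -1 then -1
           else k + PySem.Chars.find (t.drop k.toNat) b) := by
        rw [pvFindFrom_none_eq]
        simp [show ¬ k < 0 by omega, hkn]
      by_cases hneg : PySem.Chars.find (t.drop k.toNat) b = -1
      · have hres : pvFindNextCommand t b (f + 1) k = -1 := by
          simp [pvFindNextCommand, hff, hneg]
        rw [hres]
        have hinf : ¬ b <:+: t.drop k.toNat := (PySem.Chars.find_eq_neg_one_iff _ _).mp hneg
        refine Or.inl ⟨rfl, fun i h1 h2 => ?_⟩
        apply pvQ_false_of_no_prefix t b i (by omega)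
        intro hpre
        apply hinf
        have hdd : List.drop (i.toNat - k.toNat) (List.drop k.toNat t) = List.drop i.toNat t := by
          rw [List.drop_drop]
          congr 1
          omega
        have hex : ∃ j, b <+: List.drop j (List.drop k.toNat t) :=
          ⟨i.toNat - k.toNat, by rw [hdd]; exact hpre⟩
        exact (PySem.Chars.isIn_iff_infix b _).mp
          ((PySem.Chars.exists_prefix_drop_iff_isIn b (t.drop k.toNat)).mp hex)
      · set f0 := PySem.Chars.find (t.drop k.toNat) b with hf0
        have hge : 0 ≤ f0 := by
          have := PySem.Chars.neg_one_le_find (t.drop k.toNat) b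
          rw [← hf0] at this
          omega
        set p := k + f0 with hp
        have hffp : PySem.Chars.findFrom t b k none = p := by rw [hff, if_neg hneg]
        obtain ⟨hpref0, hmin0⟩ := PySem.Chars.find_spec (s := t.drop k.toNat) (sub := b) (by omega)
        have hkp : k ≤ p := by omega
        have hp0 : 0 ≤ p := by omega
        have hptn : p.toNat = k.toNat + f0.toNat := by omega
        have hpref : b <+: t.drop p.toNat := by
          rw [hptn, ← List.drop_drop]
          exact hpref0
        have hmin : ∀ i : Int, k ≤ i → i < p → pvQ t b i = false := by
          intro i h1 h2
          apply pvQ_false_of_no_prefix t b i (by omega)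
          intro hpre
          apply hmin0 (i.toNat - k.toNat) (by omega)
          rw [List.drop_drop]
          have he : k.toNat + (i.toNat - k.toNat) = i.toNat := by omega
          rw [he]
          exact hpre
        have hplen : (b.length : Int) ≤ (t.length : Int) - p := by
          have h1 := hpref.length_le
          rw [List.length_drop] at h1
          have h2 := PySem.Chars.find_le_length (t.drop k.toNat) b
          rw [← hf0, List.length_drop] at h2
          omega
        by_cases hend : (t.length : Int) ≤ p + b.length
        · have hres : pvFindNextCommand t b (f + 1) k = p := by
            simp [pvFindNextCommand, hffp, show ¬ p = -1 by omega, hend]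
          rw [hres]
          refine Or.inr ⟨hkp, by omega, ?_, hmin⟩
          simp [pvQ, pvFollow, (pvOcc_iff t b p hp0).mpr hpref, hend]
        · by_cases hal : PySem.List.pyGetD t (p + b.length) ' ' ∈ pvAlphabet
          · have hres : pvFindNextCommand t b (f + 1) k = pvFindNextCommand t b f (p + 1) := by
              simp [pvFindNextCommand, hffp, show ¬ p = -1 by omega, hend, hal]
            rw [hres]
            refine pvFirst_mono _ k (p + 1) _ _ (by omega) ?_ (ih (p + 1) (by omega) (by push_cast at hf ⊢; omega))
            intro i h1 h2
            by_cases hip : i < p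
            · exact hmin i h1 hip
            · have hipp : i = p := by omega
              subst hipp
              simp [pvQ, pvFollow, hal]
              omega
          · have hres : pvFindNextCommand t b (f + 1) k = p := by
              simp [pvFindNextCommand, hffp, show ¬ p = -1 by omega, hend, hal]
            rw [hres]
            refine Or.inr ⟨hkp, by omega, ?_, hmin⟩
            simp [pvQ, pvFollow, (pvOcc_iff t b p hp0).mpr hpref, hal]
theorem pvInner_clamp (t b : List Char) (fuel : Nat) (k : Int) (hk : k < 0) :
    pvFindNextCommand t b fuel k =
      pvFindNextCommand t b fuel (if k + t.length < 0 then 0 else k + t.length) := by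
  cases fuel with
  | zero => rfl
  | succ f =>
    simp only [pvFindNextCommand]
    rw [pvFindFrom_clamp t b k hk]

-- Python's clamping of the search start (str.find slice bound)
def pvClampStart (t : List Char) (k : Int) : Int :=
  if 0 ≤ k then k else max 0 ((t.length : Int) + k)

theorem pvClampStart_nonneg (t : List Char) (k : Int) : 0 ≤ pvClampStart t k := by
  unfold pvClampStart
  split
  · omega
  · exact le_max_left 0 _

theorem pvClamp_inner (t b : List Char) (fuel : Nat) (k : Int) :
    pvFindNextCommand t b fuel k = pvFindNextCommand t b fuel (pvClampStart t k) := by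
  by_cases hk : 0 ≤ k
  · simp [pvClampStart, hk]
  · rw [pvInner_clamp t b fuel k (by omega)]
    congr 1
    simp only [pvClampStart, if_neg hk]
    by_cases h : 0 ≤ (t.length : Int) + k
    · rw [max_eq_right h, if_neg (by omega)]
      omega
    · rw [max_eq_left (by omega), if_pos (by omega)]

theorem pvBr_false_iff (t b : List Char) (p : Int) (hp : 0 ≤ p) :
    pvBr t b p = false ↔
      (p = 0 ∨ PySem.List.pyGetD t (p - 1) ' ' ≠ '['
        ∨ (t.length : Int) ≤ p + b.length ∨ PySem.List.pyGetD t (p + b.length) ' ' ≠ ']') := by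
  constructor
  · intro h
    by_contra hc
    push Not at hc
    obtain ⟨h1, h2, h3, h4⟩ := hc
    have htrue : pvBr t b p = true := by
      simp [pvBr, h2, h4]
      omega
    rw [htrue] at h
    simp at h
  · intro h
    rcases Bool.eq_false_or_eq_true (pvBr t b p) with hx | hx
    · exfalso
      simp only [pvBr, Bool.and_eq_true, decide_eq_true_eq, beq_iff_eq] at hx
      obtain ⟨⟨⟨hx1, hx2⟩, hx3⟩, hx4⟩ := hx
      rcases h with h | h | h | h
      · omega
      · exact h hx2
      · omega
      · exact h hx4
    · exact hx

theorem pvOuter_spec (t b : List Char) (fuel : Nat) : ∀ (k : Int), k ≠ -1 →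
    (t.length : Int) + 1 ≤ (fuel : Int) + pvClampStart t k →
    pvOuterLoop t b fuel k = pvScan t b (pvClampStart t k) := by
  induction fuel with
  | zero =>
    intro k hk hf
    rw [show pvOuterLoop t b 0 k = -1 from rfl]
    exact (pvScan_none t b _ (fun i h1 h2 => absurd h2 (by omega))).symm
  | succ f ih =>
    intro k hk hf
    have hc0 : 0 ≤ pvClampStart t k := pvClampStart_nonneg t k
    set c := pvClampStart t k with hcdef
    have hinner : pvFindNextCommand t b (t.length + 2) k =
        pvFindNextCommand t b (t.length + 2) c := pvClamp_inner t b (t.length + 2) k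
    have hspec := pvInner_spec t b (t.length + 2) c hc0 (by push_cast; omega)
    set p := pvFindNextCommand t b (t.length + 2) c with hpdef
    have hstep : pvOuterLoop t b (f + 1) k =
        (if p = -1 then -1
         else if p = 0 ∨ PySem.List.pyGetD t (p - 1) ' ' ≠ '['
                ∨ (t.length : Int) ≤ p + b.length
                ∨ PySem.List.pyGetD t (p + b.length) ' ' ≠ ']' then p
         else pvOuterLoop t b f (p + 1)) := by
      simp only [pvOuterLoop, if_neg hk, hinner]
    rcases hspec with ⟨hpm1, hall⟩ | ⟨h1, h2, h3, h4⟩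
    · rw [hstep, if_pos hpm1]
      exact (pvScan_none t b _ (fun i hi1 hi2 => by
        rw [pvGoodB_eq]; simp [hall i hi1 hi2])).symm
    · have hpne : ¬ p = -1 := by omega
      have hp0 : 0 ≤ p := by omega
      have hskip : ∀ i, c ≤ i → i < p → pvGoodB t b i = false := fun i hi1 hi2 => by
        rw [pvGoodB_eq]; simp [h4 i hi1 hi2]
      by_cases hbr : pvBr t b p = true
      · have hcond : ¬ (p = 0 ∨ PySem.List.pyGetD t (p - 1) ' ' ≠ '['
            ∨ (t.length : Int) ≤ p + b.length ∨ PySem.List.pyGetD t (p + b.length) ' ' ≠ ']') := by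
          rw [← pvBr_false_iff t b p hp0]
          simp [hbr]
        rw [hstep, if_neg hpne, if_neg hcond]
        have hcl : pvClampStart t (p + 1) = p + 1 := by
          simp [pvClampStart, show (0:Int) ≤ p + 1 by omega]
        have hrec := ih (p + 1) (by omega) (by rw [hcl]; push_cast at hf ⊢; omega)
        rw [hcl] at hrec
        rw [hrec]
        have hgf : pvGoodB t b p = false := by
          rw [pvGoodB_eq]; simp [hbr]
        rw [pvScan_skip t b c p h1 hskip, pvScan_step t b p hgf]
      · have hbrf : pvBr t b p = false := by
          rcases Bool.eq_false_or_eq_true (pvBr t b p) with hx | hx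
          · exact absurd hx hbr
          · exact hx
        have hcond := (pvBr_false_iff t b p hp0).mp hbrf
        rw [hstep, if_neg hpne, if_pos hcond]
        have hgood : pvGoodB t b p = true := by
          rw [pvGoodB_eq]; simp [h3, hbrf]
        rw [pvScan_skip t b c p h1 hskip, pvScan_found t b p hgood h2]

-- ===== VERDICT (by name: the statement is the Claim_ definition above) =====
theorem findNextCommandNotAsOpt_spec : Claim_equal_findNextCommandNotAsOpt := by
  intro text badCommand pos hdom hpre
  unfold Pre_findNextCommandNotAsOpt at hpre
  unfold Spec_findNextCommandNotAsOpt findNextCommandNotAsOpt findNextCommandNotAsOpt_alt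
  have h := pvOuter_spec text.toList badCommand.toList (text.toList.length + 2) pos hpre
    (by have := pvClampStart_nonneg text.toList pos; push_cast; omega)
  rw [h]
  rfl
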